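-- pv_equiv track=rewrite | github.com/solzhen/SimpleTextIndexingBasedOnGrammar | patternread.py | group_patterns_by_occurrences
-- ===== SOURCE A (Python) =====
-- def group_patterns_by_occurrences(sorted_patterns, range_diff=1):
--     # List to hold the grouped patterns
--     grouped_patterns = []
--
--     # Temporary group to collect patterns with similar occurrences
--     current_group = []
--     last_occurrence = None
--
--     for pattern, occurrences in sorted_patterns:
--         # If it's the first pattern or the difference with the last occurrence is within the range
--         if last_occurrence is None or abs(occurrences - last_occurrence) <= range_diff:
--             current_group.append((pattern, occurrences))
--         else:
--             # When the difference exceeds the range, add the current group to the result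
--             grouped_patterns.append(current_group)
--             current_group = [(pattern, occurrences)]  # Start a new group
--
--         # Update last_occurrence
--         last_occurrence = occurrences
--
--     # Add the last group (in case it wasn't added)
--     if current_group:
--         grouped_patterns.append(current_group)
--
--     return grouped_patterns
-- ===== SOURCE B (Python) =====
-- def group_patterns_by_occurrences(sorted_patterns, range_diff=1):
--     # Recursive decomposition: peel off the leading run whose consecutive
--     # occurrence differences stay within range_diff, then recurse on the rest.
--     items = list(sorted_patterns)
--     if not items:
--         return []
--     k = 1
--     while k < len(items) and abs(items[k][1] - items[k - 1][1]) <= range_diff: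
--         k += 1
--     return [items[:k]] + group_patterns_by_occurrences(items[k:], range_diff)
-- ===== Notes on version B (the rewrite author's own statement) =====
-- stated objective: simpler
-- what changed: Replaces A's single accumulator loop with state (groups, current_group, last_occurrence) by a recursive decomposition: scan off the maximal leading run within the threshold, emit it, recurse on the remainder.
import Mathlib
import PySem

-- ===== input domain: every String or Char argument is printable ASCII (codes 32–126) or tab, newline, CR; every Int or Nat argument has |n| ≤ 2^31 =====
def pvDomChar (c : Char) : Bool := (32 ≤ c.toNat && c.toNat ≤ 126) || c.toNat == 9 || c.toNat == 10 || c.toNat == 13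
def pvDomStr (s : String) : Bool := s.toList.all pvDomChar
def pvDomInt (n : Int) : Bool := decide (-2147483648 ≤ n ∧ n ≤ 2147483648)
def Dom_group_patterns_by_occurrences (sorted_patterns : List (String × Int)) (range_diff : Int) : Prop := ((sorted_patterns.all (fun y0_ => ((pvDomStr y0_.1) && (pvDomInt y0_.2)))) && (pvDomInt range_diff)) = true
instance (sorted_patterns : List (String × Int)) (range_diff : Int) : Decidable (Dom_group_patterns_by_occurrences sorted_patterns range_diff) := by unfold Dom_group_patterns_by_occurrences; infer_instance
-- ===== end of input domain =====

-- B replaces A's accumulator loop by recursive peeling of the maximal leading run (objective: simpler).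

-- ===== PORT A =====
-- one step of A's for-loop over state (grouped_patterns, current_group, last_occurrence)
def pvStepA (range_diff : Int)
    (st : List (List (String × Int)) × List (String × Int) × Option Int)
    (po : String × Int) : List (List (String × Int)) × List (String × Int) × Option Int :=
  match st with
  | (grouped, current, last) =>
    match last with
    | none => (grouped, current ++ [po], some po.2)
    | some l =>
      if |po.2 - l| ≤ range_diff then (grouped, current ++ [po], some po.2)
      else (grouped ++ [current], [po], some po.2)

def group_patterns_by_occurrences (sorted_patterns : List (String × Int)) (range_diff : Int) : List (List (String × Int)) :=
  let st := sorted_patterns.foldl (pvStepA range_diff) ([], [], none)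
  if st.2.1 ≠ [] then st.1 ++ [st.2.1] else st.1

-- ===== PORT B =====
-- B's while loop: take the rest of the run started by an element with occurrence `last`;
-- returns (run taken, remaining items).
def pvTakeRun (range_diff last : Int) : List (String × Int) → List (String × Int) × List (String × Int)
  | [] => ([], [])
  | (p, o) :: rest =>
    if |o - last| ≤ range_diff then
      let r := pvTakeRun range_diff o rest
      ((p, o) :: r.1, r.2)
    else ([], (p, o) :: rest)

theorem pvTakeRun_len (range_diff last : Int) : ∀ xs : List (String × Int),
    (pvTakeRun range_diff last xs).2.length ≤ xs.length := by
  intro xs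
  induction xs generalizing last with
  | nil => simp [pvTakeRun]
  | cons hd tl ih =>
    obtain ⟨p, o⟩ := hd
    simp only [pvTakeRun]
    split
    · exact le_trans (ih o) (Nat.le_succ _)
    · simp

def group_patterns_by_occurrences_alt (sorted_patterns : List (String × Int)) (range_diff : Int) : List (List (String × Int)) :=
  match sorted_patterns with
  | [] => []
  | (p, o) :: rest =>
    let r := pvTakeRun range_diff o rest
    ((p, o) :: r.1) :: group_patterns_by_occurrences_alt r.2 range_diff
termination_by sorted_patterns.length
decreasing_by
  exact Nat.lt_succ_of_le (pvTakeRun_len range_diff o rest)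

-- ===== PRECONDITION & SPEC =====
def Spec_group_patterns_by_occurrences (sorted_patterns : List (String × Int)) (range_diff : Int) (out : List (List (String × Int))) : Prop := out = group_patterns_by_occurrences_alt sorted_patterns range_diff
instance (sorted_patterns : List (String × Int)) (range_diff : Int) (out : List (List (String × Int))) : Decidable (Spec_group_patterns_by_occurrences sorted_patterns range_diff out) := by unfold Spec_group_patterns_by_occurrences; infer_instance

-- ===== CLAIM (what is proved, stated in full; the proofs are below) =====
def Claim_equal_group_patterns_by_occurrences : Prop := ∀ (sorted_patterns : List (String × Int)) (range_diff : Int), Dom_group_patterns_by_occurrences sorted_patterns range_diff → Spec_group_patterns_by_occurrences sorted_patterns range_diff (group_patterns_by_occurrences sorted_patterns range_diff)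

-- ===== LEMMAS AND PROOFS =====

theorem pvAlt_nil (range_diff : Int) :
    group_patterns_by_occurrences_alt [] range_diff = [] := by
  rw [group_patterns_by_occurrences_alt]

theorem pvAlt_cons (range_diff : Int) (p : String) (o : Int) (rest : List (String × Int)) :
    group_patterns_by_occurrences_alt ((p, o) :: rest) range_diff
      = ((p, o) :: (pvTakeRun range_diff o rest).1)
          :: group_patterns_by_occurrences_alt (pvTakeRun range_diff o rest).2 range_diff := by
  rw [group_patterns_by_occurrences_alt]

-- A's loop, continued from a nonempty current group whose last occurrence is l,
-- finishes to: previous groups, then current group extended by the leading run, then B on the rest.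
theorem pvLoopA_spec (range_diff : Int) : ∀ (xs : List (String × Int))
    (g : List (List (String × Int))) (cur : List (String × Int)) (l : Int), cur ≠ [] →
    (let st := xs.foldl (pvStepA range_diff) (g, cur, some l)
     if st.2.1 ≠ [] then st.1 ++ [st.2.1] else st.1)
      = g ++ ((cur ++ (pvTakeRun range_diff l xs).1)
          :: group_patterns_by_occurrences_alt (pvTakeRun range_diff l xs).2 range_diff) := by
  intro xs
  induction xs with
  | nil =>
    intro g cur l hcur
    simp [pvTakeRun, pvAlt_nil, hcur]
  | cons hd tl ih =>
    intro g cur l hcur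
    obtain ⟨p, o⟩ := hd
    simp only [List.foldl_cons, pvStepA, pvTakeRun]
    split
    · rw [ih g (cur ++ [(p, o)]) o (by simp)]
      simp
    · rw [ih (g ++ [cur]) [(p, o)] o (by simp)]
      simp [pvAlt_cons]

-- ===== VERDICT (by name: the statement is the Claim_ definition above) =====
theorem group_patterns_by_occurrences_spec : Claim_equal_group_patterns_by_occurrences := by
  intro sorted_patterns range_diff _
  unfold Spec_group_patterns_by_occurrences
  match sorted_patterns with
  | [] => simp [group_patterns_by_occurrences, pvAlt_nil]
  | (p, o) :: rest =>
    unfold group_patterns_by_occurrences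
    simp only [List.foldl_cons, pvStepA, List.nil_append]
    rw [pvLoopA_spec range_diff rest [] [(p, o)] o (by simp), pvAlt_cons]
    simp
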